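-- pv_equiv track=rewrite | github.com/pabdominguez98/tp-1-algoritmos | tp-1-algoritmos/tp-1-algoritmos/etapa_2.py | palabras_validas
-- ===== SOURCE A (Python) =====
-- def palabras_validas(texto_a_procesar):
--     lista_palabra_valida = []
--
--     for palabra in texto_a_procesar.split():
--         palabra_sin = ''
--         for letra in palabra:
--             if (letra.isalpha()):
--                 palabra_sin += letra
--
--         if (len(palabra_sin) >= 5):
--             lista_palabra_valida.append(palabra_sin.lower())
--
--     return lista_palabra_valida
-- ===== SOURCE B (Python) =====
-- def palabras_validas(texto_a_procesar):
--     limpio = ''.join(c for c in texto_a_procesar if c.isalpha() or c.isspace())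
--     return [w.lower() for w in limpio.split() if len(w) >= 5]
-- ===== Notes on version B (the rewrite author's own statement) =====
-- stated objective: alternative
-- what changed: B replaces A's nested word/char loops by one global character-filter pass over the whole text (keeping letters and whitespace) followed by a single split() and a length-filtered lowercasing comprehension.
import Mathlib
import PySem

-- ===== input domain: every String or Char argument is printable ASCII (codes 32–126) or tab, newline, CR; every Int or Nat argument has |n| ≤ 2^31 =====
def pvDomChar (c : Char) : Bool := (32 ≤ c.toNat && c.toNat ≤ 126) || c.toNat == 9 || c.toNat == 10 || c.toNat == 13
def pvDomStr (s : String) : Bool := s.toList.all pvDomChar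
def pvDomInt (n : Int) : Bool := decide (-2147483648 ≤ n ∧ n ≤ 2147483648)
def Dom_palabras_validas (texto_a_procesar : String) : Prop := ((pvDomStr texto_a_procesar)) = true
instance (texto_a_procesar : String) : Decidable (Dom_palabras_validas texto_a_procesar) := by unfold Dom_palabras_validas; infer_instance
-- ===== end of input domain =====

-- B filters letters/whitespace out of the whole text in one pass and then splits once,
-- instead of A's nested outer-word/inner-character loops; same cost, different structure.

-- ===== PORT A =====
-- Accumulated strings are carried as List Char (palabra_sin += letra → ps ++ [letra]),
-- packed back with String.ofList; this is exact for Python's string concatenation.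
def palabras_validas (texto_a_procesar : String) : List String :=
  (PySem.Str.split₀ texto_a_procesar).foldl
    (fun lista_palabra_valida palabra =>
      let palabra_sin : List Char :=
        palabra.toList.foldl
          (fun ps letra => if PySem.Chars.isalpha letra then ps ++ [letra] else ps) []
      if 5 ≤ palabra_sin.length then
        lista_palabra_valida ++ [String.ofList (PySem.Chars.lower palabra_sin)]
      else lista_palabra_valida)
    []

-- ===== PORT B =====
def palabras_validas_alt (texto_a_procesar : String) : List String :=
  let limpio : List Char :=
    texto_a_procesar.toList.filter
      (fun c => PySem.Chars.isalpha c || PySem.Chars.isspace c)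
  ((PySem.Chars.split₀ limpio).filter (fun w => decide (5 ≤ w.length))).map
    (fun w => String.ofList (PySem.Chars.lower w))

-- ===== PRECONDITION & SPEC =====
def Spec_palabras_validas (texto_a_procesar : String) (out : List String) : Prop := out = palabras_validas_alt texto_a_procesar
instance (texto_a_procesar : String) (out : List String) : Decidable (Spec_palabras_validas texto_a_procesar out) := by unfold Spec_palabras_validas; infer_instance

-- ===== CLAIM (what is proved, stated in full; the proofs are below) =====
def Claim_equal_palabras_validas : Prop := ∀ (texto_a_procesar : String), Dom_palabras_validas texto_a_procesar → Spec_palabras_validas texto_a_procesar (palabras_validas texto_a_procesar)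

-- ===== LEMMAS AND PROOFS =====

-- isspace and isalpha are disjoint
theorem pv_space_not_alpha (c : Char) (h : PySem.Chars.isspace c = true) :
    PySem.Chars.isalpha c = false := by
  unfold PySem.Chars.isspace at h
  unfold PySem.Chars.isalpha PySem.Chars.isupper PySem.Chars.islower
  simp only [Bool.or_eq_true, Bool.and_eq_true, decide_eq_true_eq] at h
  simp only [Bool.or_eq_false_iff, Bool.and_eq_false_iff, decide_eq_false_iff_not, not_le,
    Char.le_def, UInt32.le_iff_toNat_le] at *
  have h0 : Char.toNat c = c.val.toNat := rfl
  have hA : 'A'.val.toNat = 65 := rfl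
  have hZ : 'Z'.val.toNat = 90 := rfl
  have ha : 'a'.val.toNat = 97 := rfl
  have hz : 'z'.val.toNat = 122 := rfl
  omega

-- the inner character loop of A is a filter
theorem pv_inner_foldl (l : List Char) (acc : List Char) :
    l.foldl (fun ps letra => if PySem.Chars.isalpha letra then ps ++ [letra] else ps) acc
      = acc ++ l.filter PySem.Chars.isalpha := by
  induction l generalizing acc with
  | nil => simp
  | cons c t ih =>
    by_cases h : PySem.Chars.isalpha c = true
    · simp [List.foldl_cons, h, ih]
    · simp at h; simp [List.foldl_cons, h, ih]

-- the outer loop of A is a filter-then-map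
theorem pv_outer_foldl (ws : List String) (acc : List String) :
    ws.foldl
      (fun lista palabra =>
        if 5 ≤ (palabra.toList.filter PySem.Chars.isalpha).length then
          lista ++ [String.ofList (PySem.Chars.lower (palabra.toList.filter PySem.Chars.isalpha))]
        else lista)
      acc
      = acc ++ (ws.filter (fun w => decide (5 ≤ (w.toList.filter PySem.Chars.isalpha).length))).map
          (fun w => String.ofList (PySem.Chars.lower (w.toList.filter PySem.Chars.isalpha))) := by
  induction ws generalizing acc with
  | nil => simp
  | cons w t ih =>
    by_cases h : 5 ≤ (w.toList.filter PySem.Chars.isalpha).length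
    · simp [List.foldl_cons, h, ih]
    · simp [List.foldl_cons, h, ih]

-- core: splitting the letter/space-filtered text yields exactly the per-word
-- alpha-filters of the original tokens, with empties dropped
theorem pv_go_filter (l : List Char) :
    ∀ (cur : List Char) (accA accB : List (List Char)),
    accB = (accA.map (List.filter PySem.Chars.isalpha)).filter (fun w => !w.isEmpty) →
    PySem.Chars.split₀.go
        (l.filter (fun c => PySem.Chars.isalpha c || PySem.Chars.isspace c))
        (cur.filter PySem.Chars.isalpha) accB
      = ((PySem.Chars.split₀.go l cur accA).map (List.filter PySem.Chars.isalpha)).filter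
          (fun w => !w.isEmpty) := by
  induction l with
  | nil =>
    intro cur accA accB hB
    by_cases hc : cur.filter PySem.Chars.isalpha = []
    · by_cases hcur : cur = [] <;>
        simp [PySem.Chars.split₀.go, hc, hcur, hB, List.filter_reverse, List.map_reverse]
    · have hcur : cur ≠ [] := by intro h; simp [h] at hc
      simp [PySem.Chars.split₀.go, hc, hcur, hB, List.filter_reverse, List.map_reverse]
  | cons c t ih =>
    intro cur accA accB hB
    by_cases hs : PySem.Chars.isspace c = true
    · have ha := pv_space_not_alpha c hs
      by_cases hc : cur.filter PySem.Chars.isalpha = []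
      · by_cases hcur : cur = []
        · simpa [List.filter_cons, ha, hs, PySem.Chars.split₀.go, hcur] using
            ih [] accA accB hB
        · simpa [List.filter_cons, ha, hs, PySem.Chars.split₀.go, hcur, hc] using
            ih [] (cur.reverse :: accA)
              accB (by simp [hB, List.filter_reverse, hc])
      · have hcur : cur ≠ [] := by intro h; simp [h] at hc
        simpa [List.filter_cons, ha, hs, PySem.Chars.split₀.go, hcur, hc] using
          ih [] (cur.reverse :: accA)
            ((cur.filter PySem.Chars.isalpha).reverse :: accB)
            (by simp [hB, List.filter_reverse, hc])
    · by_cases ha : PySem.Chars.isalpha c = true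
      · simpa [List.filter_cons, ha, hs, PySem.Chars.split₀.go] using
          ih (c :: cur) accA accB hB
      · simp at ha
        simpa [List.filter_cons, ha, hs, PySem.Chars.split₀.go] using
          ih (c :: cur) accA accB hB

theorem pv_split_filter (l : List Char) :
    PySem.Chars.split₀ (l.filter (fun c => PySem.Chars.isalpha c || PySem.Chars.isspace c))
      = ((PySem.Chars.split₀ l).map (List.filter PySem.Chars.isalpha)).filter
          (fun w => !w.isEmpty) := by
  simpa [PySem.Chars.split₀] using pv_go_filter l [] [] [] rfl

-- ===== VERDICT (by name: the statement is the Claim_ definition above) =====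
theorem palabras_validas_spec : Claim_equal_palabras_validas := by
  intro t _
  unfold Spec_palabras_validas palabras_validas palabras_validas_alt
  simp only [pv_inner_foldl, List.nil_append, pv_outer_foldl, pv_split_filter,
    List.filter_filter, List.filter_map]
  rw [← PySem.Str.split₀_map_toList]
  simp only [List.filter_map, List.map_map]
  congr 1
  · apply List.filter_congr
    intro w _
    by_cases h : 5 ≤ (w.toList.filter PySem.Chars.isalpha).length
    · have hne : w.toList.filter PySem.Chars.isalpha ≠ [] := by
        intro he; simp [he] at h
      simp [Function.comp, h, hne]
    · simp [Function.comp, h]
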